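-- pv_equiv track=rewrite | github.com/narasimha1902/Enemy_oF_TLE | 3912-hexadecimal-and-hexatrigesimal-conversion/hexadecimal-and-hexatrigesimal-conversion.py | concatHex36
-- ===== SOURCE A (Python) =====
-- def concatHex36(n: int) -> str:
--     def solve(val,base):
--         chars="0123456789ABCDEFGHIJKLMNOPQRSTUVWXYZ"
--         res=[]
--         while val>0:
--             res.append(chars[val%base])
--             val//=base
--         return "".join(res[::-1])
--     sq=n*n
--     return solve(sq,16)+solve(sq*n,36)
-- ===== SOURCE B (Python) =====
-- def concatHex36(n: int) -> str:
--     chars = "0123456789ABCDEFGHIJKLMNOPQRSTUVWXYZ"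
--
--     def solve(val, base):
--         if val <= 0:
--             return ""
--         return solve(val // base, base) + chars[val % base]
--
--     sq = n * n
--     return solve(sq, 16) + solve(sq * n, 36)
-- ===== Notes on version B (the rewrite author's own statement) =====
-- stated objective: alternative
-- what changed: Digit extraction is a recursive helper that prepends digits on the way back up the call stack, replacing A's while-loop that appends to a list and then reverses it with [::-1] before joining.
import Mathlib
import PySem

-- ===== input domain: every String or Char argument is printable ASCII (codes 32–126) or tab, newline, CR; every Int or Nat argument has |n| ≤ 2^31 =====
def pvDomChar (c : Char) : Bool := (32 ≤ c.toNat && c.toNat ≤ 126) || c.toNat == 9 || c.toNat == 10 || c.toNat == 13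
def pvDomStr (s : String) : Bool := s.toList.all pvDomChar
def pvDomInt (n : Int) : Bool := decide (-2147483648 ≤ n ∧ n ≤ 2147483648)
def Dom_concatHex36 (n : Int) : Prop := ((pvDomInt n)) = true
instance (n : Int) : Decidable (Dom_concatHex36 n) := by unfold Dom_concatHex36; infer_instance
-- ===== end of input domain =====

-- B replaces A's append-then-reverse digit loop by a recursive helper that prepends
-- digits on the way back up the call stack (alternative decomposition, same cost).

-- The digit table shared by both Pythons (a literal in each).
def pvChars : String := "0123456789ABCDEFGHIJKLMNOPQRSTUVWXYZ"

-- termination helper for both ports' recursions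
theorem pvFloordiv_toNat_lt (val base : Int) (hv : 0 < val) (hb : 1 < base) :
    (PySem.Int.floordiv val base).toNat < val.toNat := by
  have hb0 : (0:Int) < base := by omega
  have h1 : PySem.Int.floordiv val base < val :=
    (PySem.Int.floordiv_lt_iff_lt_mul hb0).mpr (by nlinarith)
  have h2 : 0 ≤ PySem.Int.floordiv val base :=
    (PySem.Int.le_floordiv_iff_mul_le hb0).mpr (by nlinarith)
  omega

-- ===== PORT A =====
-- A's while-loop: append chars[val % base] to res, val //= base, while val > 0.
-- chars[val % base] via PySem.Str.pyGet?; the index is always in range here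
-- (0 ≤ val % base < base ≤ 36 when val > 0), so the .getD ' ' default is never used.
def pvLoopA (val base : Int) (hb : 1 < base) (res : List Char) : List Char :=
  if h : 0 < val then
    pvLoopA (PySem.Int.floordiv val base) base hb
      (res ++ [(PySem.Str.pyGet? pvChars (PySem.Int.mod val base)).getD ' '])
  else res
termination_by val.toNat
decreasing_by exact pvFloordiv_toNat_lt val base h hb

-- "".join(res[::-1]) : res[::-1] is exactly List.reverse, join of chars is String.ofList
def pvSolveA (val base : Int) (hb : 1 < base) : String :=
  String.ofList (pvLoopA val base hb []).reverse

def concatHex36 (n : Int) : String :=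
  let sq := n * n
  pvSolveA sq 16 (by norm_num) ++ pvSolveA (sq * n) 36 (by norm_num)

-- ===== PORT B =====
-- B's recursion: "" if val <= 0, else solve(val//base, base) + chars[val % base].
def pvSolveB (val base : Int) (hb : 1 < base) : String :=
  if h : val ≤ 0 then ""
  else
    pvSolveB (PySem.Int.floordiv val base) base hb ++
      String.singleton ((PySem.Str.pyGet? pvChars (PySem.Int.mod val base)).getD ' ')
termination_by val.toNat
decreasing_by exact pvFloordiv_toNat_lt val base (by omega) hb

def concatHex36_alt (n : Int) : String :=
  let sq := n * n
  pvSolveB sq 16 (by norm_num) ++ pvSolveB (sq * n) 36 (by norm_num)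

-- ===== PRECONDITION & SPEC =====
def Spec_concatHex36 (n : Int) (out : String) : Prop := out = concatHex36_alt n
instance (n : Int) (out : String) : Decidable (Spec_concatHex36 n out) := by unfold Spec_concatHex36; infer_instance

-- ===== CLAIM (what is proved, stated in full; the proofs are below) =====
def Claim_equal_concatHex36 : Prop := ∀ (n : Int), Dom_concatHex36 n → Spec_concatHex36 n (concatHex36 n)

-- ===== LEMMAS AND PROOFS =====

theorem pvMk_append (a b : List Char) : String.ofList a ++ String.ofList b = String.ofList (a ++ b) := Eq.symm String.ofList_append

theorem pvLoop_eq (k : Nat) : ∀ (val base : Int) (hb : 1 < base) (res : List Char),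
    val.toNat ≤ k →
    String.ofList (pvLoopA val base hb res).reverse = pvSolveB val base hb ++ String.ofList res.reverse := by
  induction k with
  | zero =>
    intro val base hb res hk
    have hv : ¬ 0 < val := by omega
    rw [pvLoopA, dif_neg hv, pvSolveB, dif_pos (by omega)]
    simp
  | succ k ih =>
    intro val base hb res hk
    by_cases hv : 0 < val
    · rw [pvLoopA, dif_pos hv, pvSolveB, dif_neg (by omega)]
      rw [ih _ _ hb _ (by have := pvFloordiv_toNat_lt val base hv hb; omega)]
      rw [String.append_assoc]
      congr 1
      show _ = String.ofList [_] ++ _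
      rw [pvMk_append]
      simp
    · rw [pvLoopA, dif_neg hv, pvSolveB, dif_pos (by omega)]
      simp

theorem pvSolve_eq (val base : Int) (hb : 1 < base) : pvSolveA val base hb = pvSolveB val base hb := by
  unfold pvSolveA
  rw [pvLoop_eq val.toNat val base hb [] (le_refl _)]
  simp [String.ofList_nil]

-- ===== VERDICT (by name: the statement is the Claim_ definition above) =====
theorem concatHex36_spec : Claim_equal_concatHex36 := by
  intro n _
  show concatHex36 n = concatHex36_alt n
  unfold concatHex36 concatHex36_alt
  simp only [pvSolve_eq]
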